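-- pv_equiv track=rewrite | github.com/LLNL/scr | scripts/python/scrjob/scr_hostlist.py | numfromhost
-- ===== SOURCE A (Python) =====
-- def numfromhost(host=''):
--   number = 0
--   place = 1
--   for i in range(len(host)-1,-1,-1):
--     if host[i] == ',' or host[i] == '-' or host[i] == '[':
--       break
--     if host[i].isnumeric():
--       number += int(host[i]) * place
--       place *= 10
--   return number
-- ===== SOURCE B (Python) =====
-- def numfromhost(host=''):
--   idx = max(host.rfind(','), host.rfind('-'), host.rfind('['))
--   digits = ''.join(c for c in host[idx+1:] if c.isnumeric())
--   return int(digits) if digits else 0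
-- ===== Notes on version B (the rewrite author's own statement) =====
-- stated objective: simpler
-- what changed: Replaces the reverse index loop with place-value accumulation by a locate-slice-filter-convert decomposition: rfind the last separator, slice the suffix, keep its digit characters, convert once with int(); the per-character Python loop is replaced by C-implemented str operations.
import Mathlib
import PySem

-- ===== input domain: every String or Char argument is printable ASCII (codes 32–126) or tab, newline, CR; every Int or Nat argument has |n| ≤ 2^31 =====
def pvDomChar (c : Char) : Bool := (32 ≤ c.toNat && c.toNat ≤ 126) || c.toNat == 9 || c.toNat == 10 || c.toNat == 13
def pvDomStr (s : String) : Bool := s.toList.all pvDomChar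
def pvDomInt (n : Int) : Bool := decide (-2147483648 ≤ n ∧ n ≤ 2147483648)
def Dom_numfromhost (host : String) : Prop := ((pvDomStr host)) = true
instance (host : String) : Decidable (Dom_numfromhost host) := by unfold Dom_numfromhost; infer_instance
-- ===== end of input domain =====

-- B replaces A's reverse index loop (place-value accumulation) by rfind-the-last-separator,
-- slice the suffix, filter the digits and convert once; objective: simpler.


-- ===== PORT A =====
-- the 'for i in range(len(host)-1,-1,-1)' loop with its break = structural recursion over the
-- reversed character list carrying (number, place); isnumeric = PySem.Chars.isdigit and
-- int(host[i]) = code point - 48, exact on the ASCII domain.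
def numA_loop : List Char → Int → Int → Int
  | [], number, _ => number
  | c :: rest, number, place =>
    if c == ',' || c == '-' || c == '[' then number
    else if PySem.Chars.isdigit c then
      numA_loop rest (number + ((c.toNat : Int) - 48) * place) (place * 10)
    else numA_loop rest number place

def numfromhost (host : String) : Int := numA_loop host.toList.reverse 0 1

-- ===== PORT B =====
-- host.rfind(c) for a single character, ported directly: highest index of c, or -1.
def rfindChar (cs : List Char) (c : Char) : Int :=
  if cs.reverse.findIdx (· == c) = cs.length then -1
  else (cs.length : Int) - 1 - cs.reverse.findIdx (· == c)

-- int(digits) if digits else 0 : Horner evaluation of the decimal digit string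
def numB_fromDigits (digits : List Char) : Int :=
  if digits.isEmpty then 0
  else digits.foldl (fun a c => 10 * a + ((c.toNat : Int) - 48)) 0

def numfromhost_alt (host : String) : Int :=
  numB_fromDigits
    ((PySem.List.slice host.toList
        (some (max (max (rfindChar host.toList ',') (rfindChar host.toList '-'))
                   (rfindChar host.toList '[') + 1)) none).filter
      (fun c => PySem.Chars.isdigit c))

-- ===== PRECONDITION & SPEC =====
def Spec_numfromhost (host : String) (out : Int) : Prop := out = numfromhost_alt host
instance (host : String) (out : Int) : Decidable (Spec_numfromhost host out) := by unfold Spec_numfromhost; infer_instance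

-- ===== CLAIM (what is proved, stated in full; the proofs are below) =====
def Claim_equal_numfromhost : Prop := ∀ (host : String), Dom_numfromhost host → Spec_numfromhost host (numfromhost host)

-- ===== LEMMAS AND PROOFS =====

def pvSep (c : Char) : Bool := c == ',' || c == '-' || c == '['

-- right-to-left digit value (first element has place 1), skipping non-digits
def pvDVal : List Char → Int
  | [] => 0
  | c :: r => if PySem.Chars.isdigit c then ((c.toNat : Int) - 48) + 10 * pvDVal r else pvDVal r

theorem numA_loop_eq (l : List Char) : ∀ n p : Int,
    numA_loop l n p = n + p * pvDVal (l.takeWhile (fun c => !pvSep c)) := by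
  induction l with
  | nil => intro n p; simp [numA_loop, pvDVal]
  | cons c rest ih =>
    intro n p
    cases hsp : pvSep c with
    | true =>
      have hs : (c == ',' || c == '-' || c == '[') = true := by simpa [pvSep] using hsp
      simp [numA_loop, hs, List.takeWhile_cons, hsp, pvDVal]
    | false =>
      have hs : (c == ',' || c == '-' || c == '[') = false := by simpa [pvSep] using hsp
      by_cases hd : PySem.Chars.isdigit c = true
      · simp [numA_loop, hs, hd, List.takeWhile_cons, hsp, pvDVal, ih]; ring
      · simp [numA_loop, hs, hd, List.takeWhile_cons, hsp, pvDVal, ih]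

theorem pvDVal_filter (l : List Char) :
    pvDVal (l.filter (fun c => PySem.Chars.isdigit c)) = pvDVal l := by
  induction l with
  | nil => rfl
  | cons c r ih =>
    by_cases hd : PySem.Chars.isdigit c = true
    · simp [List.filter_cons, hd, pvDVal, ih]
    · simp [List.filter_cons, hd, pvDVal, ih]

theorem foldl_reverse_eq_pvDVal (u : List Char) (h : ∀ c ∈ u, PySem.Chars.isdigit c = true) :
    u.reverse.foldl (fun a c => 10 * a + ((c.toNat : Int) - 48)) 0 = pvDVal u := by
  induction u with
  | nil => rfl
  | cons c r ih =>
    have hc : PySem.Chars.isdigit c = true := h c (by simp)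
    have hr : ∀ x ∈ r, PySem.Chars.isdigit x = true := fun x hx => h x (by simp [hx])
    simp only [List.reverse_cons, List.foldl_append, List.foldl_cons, List.foldl_nil,
      ih hr, pvDVal, hc, if_true]
    ring

theorem findIdx_or (p q : Char → Bool) (l : List Char) :
    l.findIdx (fun x => p x || q x) = min (l.findIdx p) (l.findIdx q) := by
  induction l with
  | nil => simp [List.findIdx_nil]
  | cons a l ih =>
    simp only [List.findIdx_cons]
    cases hp : p a <;> cases hq : q a <;>
      simp only [Bool.or_self, Bool.or_true, Bool.true_or, cond_true, cond_false, ih] <;> omega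

theorem rfindChar_eq (cs : List Char) (c : Char) :
    rfindChar cs c = (cs.length : Int) - 1 - (cs.reverse.findIdx (· == c)) := by
  simp only [rfindChar]
  have hle : cs.reverse.findIdx (· == c) ≤ cs.length := by
    simpa using List.findIdx_le_length (p := (· == c)) (xs := cs.reverse)
  split_ifs with h
  · omega
  · rfl

theorem takeWhile_eq_take_findIdx (p : Char → Bool) (l : List Char) :
    l.takeWhile (fun c => !p c) = l.take (l.findIdx p) := by
  induction l with
  | nil => rfl
  | cons a l ih =>
    by_cases hp : p a = true
    · simp [List.findIdx_cons, hp]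
    · simp [List.findIdx_cons, hp, ih]

theorem numfromhost_main (host : String) :
    numfromhost host = numfromhost_alt host := by
  unfold numfromhost numfromhost_alt
  set cs := host.toList with hcs
  set rs := cs.reverse with hrs
  set F : Nat := rs.findIdx pvSep with hF
  have hFle : F ≤ cs.length := by
    have := List.findIdx_le_length (p := pvSep) (xs := rs)
    simpa [hrs] using this
  have hmax : max (max (rfindChar cs ',') (rfindChar cs '-')) (rfindChar cs '[') =
      (cs.length : Int) - 1 - F := by
    rw [rfindChar_eq, rfindChar_eq, rfindChar_eq]
    have hmin : rs.findIdx pvSep =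
        min (min (rs.findIdx (· == ',')) (rs.findIdx (· == '-'))) (rs.findIdx (· == '[')) := by
      have h1 := findIdx_or (fun c => c == ',' || c == '-') (fun c => c == '[') rs
      have h2 := findIdx_or (fun c => c == ',') (fun c => c == '-') rs
      have h0 : rs.findIdx pvSep = rs.findIdx (fun c => (c == ',' || c == '-') || c == '[') := by
        congr 1
      rw [h0, h1, h2]
    simp only [← hrs]
    rw [hF, hmin]
    omega
  rw [hmax]
  have hnn : (0:Int) ≤ (cs.length : Int) - 1 - F + 1 := by omega
  rw [PySem.List.slice_from _ hnn]
  have htn : ((cs.length : Int) - 1 - (F:Int) + 1).toNat = cs.length - F := by omega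
  rw [htn]
  have hdrop : cs.drop (cs.length - F) = (rs.take F).reverse := by
    conv_lhs => rw [show cs = rs.reverse by simp [hrs]]
    rw [List.drop_reverse]
    congr 2
    simp [hrs]
    omega
  rw [hdrop, numA_loop_eq, takeWhile_eq_take_findIdx pvSep rs, ← hF]
  have hfil : (rs.take F).reverse.filter (fun c => PySem.Chars.isdigit c)
      = ((rs.take F).filter (fun c => PySem.Chars.isdigit c)).reverse := by
    simp [List.filter_reverse]
  rw [hfil]
  have hall : ∀ c ∈ (rs.take F).filter (fun c => PySem.Chars.isdigit c),
      PySem.Chars.isdigit c = true := fun c hc => (List.mem_filter.mp hc).2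
  unfold numB_fromDigits
  by_cases he : (((rs.take F).filter (fun c => PySem.Chars.isdigit c)).reverse).isEmpty = true
  · have hu : (rs.take F).filter (fun c => PySem.Chars.isdigit c) = [] := by simpa using he
    have h0 : pvDVal (rs.take F) = 0 := by rw [← pvDVal_filter (rs.take F), hu]; rfl
    simp [he, h0]
  · rw [if_neg he, foldl_reverse_eq_pvDVal _ hall, pvDVal_filter]
    ring

-- ===== VERDICT (by name: the statement is the Claim_ definition above) =====
theorem numfromhost_spec : Claim_equal_numfromhost := by
  intro host _
  unfold Spec_numfromhost
  exact numfromhost_main host
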